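-- pv_equiv track=rewrite | github.com/Maarten7/advent-of-code | 2017/advent2017_6.py | redistribution_cycles
-- ===== SOURCE A (Python) =====
-- def redistribute(state):
--
--     # determine memory bank with most blocks
--     max_blocks = max(state)
--     i = state.index(max_blocks)
--
--     # take all blocks from bank
--     state[i] = 0
--
--     # redistribute blocks
--     for j in range(max_blocks):
--         try:
--             state[i + 1] += 1
--             i += 1
--         except IndexError:
--             i = 0
--             state[i] += 1
--
--     return state
--
-- def redistribution_cycles(state):
--     states = []
--     count = 0
--
--     while state not in states:
--
--         states.append(state.copy())
--         state = redistribute(state)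
--         count += 1
--
--     loop_lenght = count - states.index(state)
--     return count, loop_lenght
-- ===== SOURCE B (Python) =====
-- def redistribution_cycles(state):
--     seen = {}
--     count = 0
--     while tuple(state) not in seen:
--         seen[tuple(state)] = count
--         n = len(state)
--         max_blocks = max(state)
--         i = state.index(max_blocks)
--         state[i] = 0
--         if max_blocks > 0:
--             q, r = divmod(max_blocks, n)
--             for k in range(n):
--                 state[k] += q
--             for k in range(r):
--                 state[(i + 1 + k) % n] += 1
--         count += 1
--     return count, count - seen[tuple(state)]
-- ===== Notes on version B (the rewrite author's own statement) =====
-- stated objective: alternative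
-- what changed: Cycle detection uses a dict keyed by the state (membership and the stored step index replace the linear scan over the list of previous states plus list.index), and each redistribution is computed in closed form with divmod (add q to every bank, one extra block to each of the r banks after the emptied one) instead of moving max_blocks blocks one at a time; intended as faster per step, but a timing run could not confirm it consistently at the largest sizes.
import Mathlib
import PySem

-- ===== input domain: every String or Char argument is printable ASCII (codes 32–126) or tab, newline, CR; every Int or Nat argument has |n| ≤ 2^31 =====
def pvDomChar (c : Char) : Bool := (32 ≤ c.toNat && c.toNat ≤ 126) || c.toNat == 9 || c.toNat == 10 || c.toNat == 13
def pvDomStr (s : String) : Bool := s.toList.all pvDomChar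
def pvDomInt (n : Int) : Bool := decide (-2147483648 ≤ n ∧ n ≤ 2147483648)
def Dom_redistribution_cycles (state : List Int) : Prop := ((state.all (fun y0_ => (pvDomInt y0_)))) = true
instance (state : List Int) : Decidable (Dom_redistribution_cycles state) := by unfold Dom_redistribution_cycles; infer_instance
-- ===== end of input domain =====

-- B replaces the per-step list-membership/index scan by a dict keyed by the state, and the
-- one-block-at-a-time redistribution by a closed-form divmod distribution; both A and B mutate the
-- caller's list in Python identically, and the equivalence proved here is about the return value.

-- ===== PORT A =====

-- totality guard shared by both loop ports: an upper bound on the number of iterations before a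
-- state repeats (all reachable states have entries in a finite box); never reached in practice.
def pvFuel (state : List Int) : Nat :=
  let n := state.length
  let M := state.foldl (fun a x => a + x.natAbs) 0
  ((n + 2) * M + 1) ^ n + 2

-- the inner 'for j in range(max_blocks)' loop of A: try state[i+1] += 1 / except: i = 0; state[0] += 1
def innerA : List Int → Nat → Nat → List Int
  | s, _, 0 => s
  | s, i, j+1 =>
    if i + 1 < s.length then innerA (s.modify (i+1) (· + 1)) (i+1) j
    else innerA (s.modify 0 (· + 1)) 0 j

def redistribute (state : List Int) : List Int :=
  match PySem.List.max? state (fun x => x) with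
  | none => state   -- Python's max raises ValueError on an empty list; such inputs are outside Pre_
  | some max_blocks =>
    let i := (PySem.List.index? state max_blocks).getD 0
    innerA (state.set i 0) i max_blocks.toNat

-- the 'while state not in states' loop of A (fuel is only a totality guard)
def loopA : Nat → List (List Int) → List Int → Int → Int × Int
  | 0, states, state, count =>
    if state ∈ states then (count, count - (((PySem.List.index? states state).getD 0 : Nat) : Int))
    else (0, 0)
  | fuel+1, states, state, count =>
    if state ∈ states then (count, count - (((PySem.List.index? states state).getD 0 : Nat) : Int))
    else loopA fuel (states ++ [state]) (redistribute state) (count + 1)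

def redistribution_cycles (state : List Int) : Int × Int :=
  loopA (pvFuel state) [] state 0

-- ===== PORT B =====

def redistribute_alt (state : List Int) : List Int :=
  let n := state.length
  match PySem.List.max? state (fun x => x) with
  | none => state   -- Python's max raises ValueError on an empty list; such inputs are outside Pre_
  | some max_blocks =>
    let i := (PySem.List.index? state max_blocks).getD 0
    let s1 := state.set i 0
    if 0 < max_blocks then
      let q := PySem.Int.floordiv max_blocks (n : Int)
      let r := (PySem.Int.mod max_blocks (n : Int)).toNat
      let s2 := (List.range n).foldl (fun t k => t.modify k (· + q)) s1
      (List.range r).foldl (fun t k => t.modify ((i + 1 + k) % n) (· + 1)) s2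
    else s1

-- the 'while tuple(state) not in seen' loop of B
def loopB : Nat → PySem.Dict (List Int) Int → List Int → Int → Int × Int
  | 0, seen, state, count =>
    match PySem.Dict.get? seen state with
    | some v => (count, count - v)
    | none => (0, 0)
  | fuel+1, seen, state, count =>
    match PySem.Dict.get? seen state with
    | some v => (count, count - v)
    | none => loopB fuel (seen.insert state count) (redistribute_alt state) (count + 1)

def redistribution_cycles_alt (state : List Int) : Int × Int :=
  loopB (pvFuel state) PySem.Dict.empty state 0

-- ===== PRECONDITION & SPEC =====
-- Pre_ excludes only the empty list, on which Python's max raises ValueError (in both A and B).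
def Pre_redistribution_cycles (state : List Int) : Prop := state ≠ []
instance (state : List Int) : Decidable (Pre_redistribution_cycles state) := by
  unfold Pre_redistribution_cycles; infer_instance

def pvWitness_redistribution_cycles : List Int := [0, 2, 7, 0]

def Spec_redistribution_cycles (state : List Int) (out : Int × Int) : Prop := out = redistribution_cycles_alt state
instance (state : List Int) (out : Int × Int) : Decidable (Spec_redistribution_cycles state out) := by unfold Spec_redistribution_cycles; infer_instance

-- ===== CLAIM (what is proved, stated in full; the proofs are below) =====
def Claim_equal_redistribution_cycles : Prop := ∀ (state : List Int), Dom_redistribution_cycles state → Pre_redistribution_cycles state → Spec_redistribution_cycles state (redistribution_cycles state)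

-- ===== LEMMAS AND PROOFS =====

-- length is preserved by any fold of modifies
theorem pv_fold_modify_length (g : Nat → Nat) (c : Int) :
    ∀ (l : List Nat) (s : List Int),
      (l.foldl (fun t k => t.modify (g k) (· + c)) s).length = s.length := by
  intro l
  induction l with
  | nil => intro s; rfl
  | cons k l ih => intro s; simp [List.foldl_cons, ih, List.length_modify]

-- entries after a fold of "+c at position g k" bumps
theorem pv_fold_modify_getElem (g : Nat → Nat) (c : Int) :
    ∀ (l : List Nat) (s : List Int) (p : Nat) (hp : p < s.length)
      (hq : p < (l.foldl (fun t k => t.modify (g k) (· + c)) s).length),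
      (l.foldl (fun t k => t.modify (g k) (· + c)) s)[p] =
        s[p] + c * (l.countP (fun k => g k = p) : Int) := by
  intro l
  induction l with
  | nil => intro s p hp hq; simp
  | cons k l ih =>
    intro s p hp hq
    have hlen : p < (s.modify (g k) (· + c)).length := by simpa [List.length_modify] using hp
    have hih := ih (s.modify (g k) (· + c)) p hlen
      (by simpa [pv_fold_modify_length, List.length_modify] using hp)
    simp only [List.foldl_cons] at *
    rw [hih, List.getElem_modify]
    by_cases h : g k = p <;> simp [h] <;> ring

theorem pv_innerA_eq_fold :
    ∀ (j : Nat) (s : List Int) (i : Nat), i < s.length →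
      innerA s i j =
        (List.range j).foldl (fun t k => t.modify ((i + 1 + k) % s.length) (· + 1)) s := by
  intro j
  induction j with
  | zero => intro s i _; rfl
  | succ j ih =>
    intro s i hi
    have hn : 0 < s.length := Nat.lt_of_le_of_lt (Nat.zero_le _) hi
    have hstep : innerA s i (j+1) =
        innerA (s.modify ((i+1) % s.length) (· + 1)) ((i+1) % s.length) j := by
      by_cases h : i + 1 < s.length
      · rw [Nat.mod_eq_of_lt h]; simp [innerA, h]
      · have h2 : i + 1 = s.length := by omega
        simp [innerA, h2, Nat.mod_self]
    have hlt : (i+1) % s.length < (s.modify ((i+1) % s.length) (· + 1)).length := by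
      rw [List.length_modify]; exact Nat.mod_lt _ hn
    rw [hstep, ih (s.modify ((i+1) % s.length) (· + 1)) ((i+1) % s.length) hlt]
    rw [List.range_succ_eq_map, List.foldl_cons, List.foldl_map]
    have hfun : (fun (t : List Int) (k : Nat) =>
          t.modify (((i+1) % s.length + 1 + k) % (s.modify ((i+1) % s.length) (· + 1)).length) (· + 1))
        = fun (t : List Int) (k : Nat) => t.modify ((i + 1 + Nat.succ k) % s.length) (· + 1) := by
      funext t k
      congr 1
      rw [List.length_modify]
      conv_rhs => rw [show i + 1 + Nat.succ k = i + 1 + (1 + k) by omega, ← Nat.mod_add_mod]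
      rw [Nat.add_assoc]
    rw [hfun]

-- counting a decidable equality with countP is List.count
theorem pv_countP_range_eq_one (n k0 : Nat) (h : k0 < n) :
    (List.range n).countP (fun k => k = k0) = 1 := by
  rw [show (fun k => decide (k = k0)) = (fun k => k == k0) from by
      funext k; simp [beq_eq_decide], ← List.count]
  exact List.count_eq_one_of_mem (List.nodup_range) (List.mem_range.mpr h)

-- one full window of n consecutive positions hits p exactly once
theorem pv_countP_range_window (n a p : Nat) (hn : 0 < n) (hp : p < n) :
    (List.range n).countP (fun k => (a + k) % n = p) = 1 := by
  have hamod : a % n < n := Nat.mod_lt _ hn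
  have hk0lt : (p + (n - a % n)) % n < n := Nat.mod_lt _ hn
  have hhit : (a + (p + (n - a % n)) % n) % n = p := by
    rw [Nat.add_mod_mod]
    have h2 := Nat.div_add_mod a n
    rw [show a + (p + (n - a % n)) = (p + n) + n * (a / n) from by omega]
    rw [Nat.add_mul_mod_self_left, Nat.add_mod_right, Nat.mod_eq_of_lt hp]
  have huniq : ∀ k, k < n → ((a + k) % n = p ↔ k = (p + (n - a % n)) % n) := by
    intro k hk
    constructor
    · intro h
      have hmeq : a + k ≡ a + (p + (n - a % n)) % n [MOD n] := by
        unfold Nat.ModEq; rw [h, hhit]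
      have hc := Nat.ModEq.add_left_cancel' a hmeq
      unfold Nat.ModEq at hc
      rwa [Nat.mod_eq_of_lt hk, Nat.mod_eq_of_lt hk0lt] at hc
    · intro h; rw [h]; exact hhit
  have hcongr : (List.range n).countP (fun k => (a + k) % n = p)
      = (List.range n).countP (fun k => k = (p + (n - a % n)) % n) := by
    apply List.countP_congr
    intro k hk
    simp only [decide_eq_true_eq]
    exact huniq k (List.mem_range.mp hk)
  rw [hcongr]
  exact pv_countP_range_eq_one n _ hk0lt

theorem pv_countP_range_qnr (n a p : Nat) (hn : 0 < n) (hp : p < n) :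
    ∀ (q r : Nat),
      (List.range (q * n + r)).countP (fun k => (a + k) % n = p)
        = q + (List.range r).countP (fun k => (a + k) % n = p) := by
  intro q
  induction q with
  | zero => intro r; simp
  | succ q ih =>
    intro r
    rw [show (q + 1) * n + r = n + (q * n + r) from by ring,
      List.range_add, List.countP_append, List.countP_map]
    have hshift : ((fun k => decide ((a + k) % n = p)) ∘ (fun x => n + x))
        = fun k => decide ((a + k) % n = p) := by
      funext k
      simp only [Function.comp]
      congr 1
      rw [show a + (n + k) = a + k + n from by ring, Nat.add_mod_right]
    rw [hshift, ih, pv_countP_range_window n a p hn hp]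
    ring

-- the redistribution step of A equals the closed-form step of B, on every list
theorem pv_step_eq (s : List Int) : redistribute s = redistribute_alt s := by
  unfold redistribute redistribute_alt
  cases hmax : PySem.List.max? s (fun x => x) with
  | none => rfl
  | some mb =>
    simp only
    have hmem : mb ∈ s := PySem.List.max?_mem hmax
    have hidx : (PySem.List.index? s mb).isSome := (PySem.List.index?_isSome_iff s mb).mpr hmem
    obtain ⟨i, hi⟩ := Option.isSome_iff_exists.mp hidx
    obtain ⟨hilt, -, -⟩ := PySem.List.getElem_of_index?_eq_some hi
    rw [hi]
    simp only [Option.getD_some]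
    have hn : 0 < s.length := Nat.lt_of_le_of_lt (Nat.zero_le _) hilt
    have hs1len : (s.set i 0).length = s.length := List.length_set
    by_cases hpos : 0 < mb
    · rw [if_pos hpos]
      obtain ⟨j, rfl⟩ : ∃ j : Nat, mb = (j : Int) := ⟨mb.toNat, by omega⟩
      rw [PySem.Int.floordiv_natCast j s.length, PySem.Int.mod_natCast j s.length]
      simp only [Int.toNat_natCast]
      rw [pv_innerA_eq_fold j (s.set i 0) i (by rw [hs1len]; exact hilt)]
      apply List.ext_getElem
      · rw [pv_fold_modify_length, pv_fold_modify_length, pv_fold_modify_length, hs1len]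
      · intro p hpA hpB
        have hplen : p < (s.set i 0).length := by
          rw [pv_fold_modify_length] at hpA; exact hpA
        have hp : p < s.length := hs1len ▸ hplen
        have hlen2 : p < ((List.range s.length).foldl
            (fun t k => t.modify k (· + ((j / s.length : Nat) : Int))) (s.set i 0)).length := by
          rw [pv_fold_modify_length]; exact hplen
        rw [pv_fold_modify_getElem (fun k => (i + 1 + k) % (s.set i 0).length) 1 _ _ p hplen hpA]
        rw [pv_fold_modify_getElem (fun k => (i + 1 + k) % s.length) 1 _ _ p hlen2 hpB]
        rw [pv_fold_modify_getElem (fun k => k) _ (List.range s.length) (s.set i 0) p hplen hlen2]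
        rw [pv_countP_range_eq_one s.length p hp]
        have hcnt : (List.range j).countP (fun k => (i + 1 + k) % s.length = p)
            = j / s.length
              + (List.range (j % s.length)).countP (fun k => (i + 1 + k) % s.length = p) := by
          conv_lhs => rw [show j = (j / s.length) * s.length + j % s.length from by
            rw [Nat.mul_comm]; exact (Nat.div_add_mod j s.length).symm]
          exact pv_countP_range_qnr s.length (i+1) p hn hp _ _
        rw [hs1len, hcnt]
        push_cast
        ring
    · rw [if_neg hpos]
      have h0 : mb.toNat = 0 := by omega
      rw [h0]
      rfl

-- the two outer loops agree whenever the dict mirrors the states list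
theorem pv_loop_eq :
    ∀ (fuel : Nat) (states : List (List Int)) (seen : PySem.Dict (List Int) Int)
      (state : List Int) (count : Int),
      (∀ k, PySem.Dict.get? seen k = (PySem.List.index? states k).map (fun m => Int.ofNat m)) →
      count = (states.length : Int) →
      loopA fuel states state count = loopB fuel seen state count := by
  intro fuel
  induction fuel with
  | zero =>
    intro states seen state count hinv hcount
    simp only [loopA, loopB, hinv state]
    by_cases hmem : state ∈ states
    · obtain ⟨m, hm⟩ := Option.isSome_iff_exists.mp ((PySem.List.index?_isSome_iff states state).mpr hmem)
      rw [hm, if_pos hmem]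
      simp
    · rw [(PySem.List.index?_eq_none_iff states state).mpr hmem, if_neg hmem]
      rfl
  | succ fuel ih =>
    intro states seen state count hinv hcount
    simp only [loopA, loopB, hinv state]
    by_cases hmem : state ∈ states
    · obtain ⟨m, hm⟩ := Option.isSome_iff_exists.mp ((PySem.List.index?_isSome_iff states state).mpr hmem)
      rw [hm, if_pos hmem]
      simp
    · rw [(PySem.List.index?_eq_none_iff states state).mpr hmem, if_neg hmem]
      change loopA fuel (states ++ [state]) (redistribute state) (count + 1)
        = loopB fuel (seen.insert state count) (redistribute_alt state) (count + 1)
      rw [pv_step_eq]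
      apply ih
      · intro k
        rw [PySem.Dict.get?_insert]
        by_cases hk : k = state
        · subst hk
          rw [if_pos rfl, PySem.List.index?_append_singleton_self _ _ hmem]
          simp [hcount]
        · rw [if_neg hk, hinv k]
          by_cases hkmem : k ∈ states
          · rw [PySem.List.index?_append_of_mem _ hkmem]
          · rw [(PySem.List.index?_eq_none_iff states k).mpr hkmem,
              (PySem.List.index?_eq_none_iff _ k).mpr ?_]
            simp only [List.mem_append, List.mem_singleton]
            push_neg
            exact ⟨hkmem, hk⟩
      · simp [hcount]

-- ===== VERDICT (by name: the statement is the Claim_ definition above) =====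
theorem redistribution_cycles_spec : Claim_equal_redistribution_cycles := by
  intro state _ _
  unfold Spec_redistribution_cycles redistribution_cycles redistribution_cycles_alt
  apply pv_loop_eq
  · intro k; rfl
  · rfl
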